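/-
  SEGMENT R10 OF `start_decoder` (0x116380 – 0x116385 + 0x116233 – 0x116357: the coupling loop 4110 of the mapping section,
  stb_vorbis_fixed.c 4110 – 4116; 76 instructions, 7 contract calls — ilog ×2, get_bits ×2, error ×3 —, 8 check sites; loop37 = the
  whole unit) SPLIT AT THE LOOP HEAD AND AT THE RETURNS OF THE TWO get_bits (the cuts of the farm's report on start_decoder.R10:
  cut290, cut292, the head cut296 = loop37), THE THREE ERROR STUBS IN A CHILD OF THEIR OWN: the assertions at the cut points, the
  claims of the five children, and the composition `SegR10.of_parts` (pure logic: `ReachVia.trans`, `ReachVia.loop` with the measure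
  `16 − r13`; no machine step).

      R10a  0x116380–0x116385                                  `r13d = dword [R + 24H]` (= Z24 = 0), `jmp` to the head
                                                               exit: AtR10h 0 (`InR10 … cut296 0`)
      R10b  0x116351–0x116357 + 0x116233–0x116243,             the head: `k < m->coupling_steps` (`movzx eax, word [rbx] ; cmp eax, r13d ; jg`);
            returns into 0x116248 (cut290)                     no: R11 (0x11635d, MP4 complete); yes: `get_bits(f, ilog(f->channels − 1))`
                                                               (cut289, ilog's return, stays inside)
                                                               exit: AtR11 ∨ AtR10b k (`InR10 … cut290 k` ∧ `k < coupling_steps`)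
      R10c  0x116248–0x11629c, returns into 0x1162a1 (cut292)  the spill of eax to `[R + 18H]`, `[R + 30H] = m + 8` (checked load8 of `m->chan`),
                                                               `r12 = 3·k`, `chan[k].magnitude = byte [R + 18H]` (checked store1), `[R + 38H] =
                                                               f + 4` (checked load4 of `f->channels`), `get_bits(f, ilog(channels − 1))`
                                                               (cut291 stays inside)
                                                               exit: AtR10c k (`InR10 … cut292 k` ∧ `k < coupling_steps` ∧ r12 ∧ the two spills)
      R10d  0x1162a1–0x1162f7 + 0x11630b–0x116321 +            `chan[k].angle = al` (checked load8 via `[R + 30H]`, checked store1), the three tests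
            0x116335–0x116339 + 0x11634d                       of lines 4113 – 4115 on the RE-LOADED bytes (checked load1 ×2, checked load4 via
                                                               `[R + 38H]`), `++k`
                                                               exit: AtR10h (k + 1) ∨ AtR10s (the entry of one of the three stubs)
      R10e  0x1162f9–0x116306 + 0x116323–0x116330 +            the three stubs `mov esi, 20 ; mov rdi, rbp ; call error ; jmp 113b22`
            0x11633b–0x116348                                  exit: AtERR

  2 + 9 + 23 + 30 + 12 = 76 instructions = the parent's. WHY A STUB CHILD HERE (and not in R9): R10d has 30 instructions and 5 check
  sites without the stubs; with them it would have 42 and three more contract calls.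

  WHAT IS LIVE AT THE CUTS (read off c/vorbis_f.dis 116233 … 116357, 116380 … 116385):
      0x116351 (cut296)  reads rbx (`movzx eax, word [rbx]`: coupling_steps), r13d (= k), rbp, rsp. r12, r15, `[R + 18H]`, `[R + 30H]`,
                         `[R + 38H]` are rewritten before they are read.
      0x116248 (cut290)  reads eax (stored as a byte: no constraint — magnitude is re-loaded and TESTED 0x1162d4 – 0x1162f7), rbx, r13d, rbp, rsp.
      0x1162a1 (cut292)  reads eax (no constraint: angle is re-loaded and tested 0x116315 – 0x116321), `[R + 30H]` (0x1162a5: the address of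
                         the checked load8 = m + 8), r12 (= 3·k: 0x1162af, 0x1162c8), rbx, `[R + 38H]` (0x1162e4: the address of the checked
                         load4 = f + 4), r13d (0x11634d), rbp, rsp. r15, `[R + 18H]` are rewritten.
      the stubs          read rbp (`mov rdi, rbp`), rsp.
  cut290, cut292, cut296 exist in Vorbis/Labels.lean; THE STUB ENTRIES ARE NEW LABELS `L.start_decoder.at_1162f9`, `at_116323`,
  `at_11633b` (Vorbis/LabelsAt.lean, table `AT` of c/gen_labels.py).

  FROM THE FARM'S REPORT (work/start_decoder.R10.1/Lemmas.lean): `InR10` = its `Pt` + `r13 = addr k`; `BodyR10c` = its hypothesis of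
  `h3` + the two spill slots (its RESULT.json names them; 0x1162a5 and 0x1162e4 read them); `R10.of_body`, `R10.toR11`, `R10.succ` = its
  `Pt.of_body`, `Pt.toR11`, `Pt.succ`; `SegR10.of_parts` = its `compose_r10`, with the measure `16 − r13` in place of
  `coupling_steps − r13` (so no child has to state that `coupling_steps` is unchanged). Its frame lemma `Pt.keeps` / `Pt.carry` is
  `MapLoop.carry` (Vorbis/Spec/StartDecoderMapMode.lean). Its walks `seg_entry`, `part1` are the proofs of R10a, R10b.
  Hints for the workers: farm/hints/start_decoder.R10.md.
-/
import Vorbis.Spec.StartDecoderMapMode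
import Vorbis.LabelsAt
namespace Vorbis.Spec.StartDecoder
open X86 X86.User Asan

/-! ### The assertions at the cut points -/

/-- **A POINT INSIDE SEGMENT R10** at the program counter `pc`, with `k` coupling steps finished (= the farm worker's `Pt` + r13):
`BodyR10` (the mapping loop's record, `rbx = m(i)`, the record under construction at stage 10: MP2, MP3, `1 ≤ coupling_steps ≤ C`), the
counter, and MP4 for the steps below `k`. -/
structure InR10 (u₀ : State) (g : Ghost) (pc : Word) (i k : Nat) (A7 A7c Ai : Arena) (A : Arena × List Obj) (v : State) :
    Prop where
  /-- the invariant of the mapping loop 4095 at `pc` -/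
  loop : MapLoop u₀ g pc i A7 A7c Ai A v
  /-- rbx = m(i) (read 0x116351 0x11624c 0x116267 0x1162b2 0x1162c8; callee-saved over ilog / get_bits) -/
  rbx : v.reg .rbx = addr (mapAt g v.mem i)
  /-- MP2, MP3, `1 ≤ coupling_steps ≤ C` of the record under construction (`coupling_steps` is not rewritten in R10) -/
  cur : MapCur g (Since Ai A.1) v.mem i 10
  /-- r13 = k, the whole register (`mov r13d, [R + 24H]` 0x116380, `add r13d, 1` 0x11634d: both zero-extend; read 0x116354, 0x11625d) -/
  r13 : v.reg .r13 = addr k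
  /-- the counter is at most `coupling_steps` (≤ C ≤ 16) -/
  k_le : k ≤ Mapping.coupling_steps v.mem (mapAt g v.mem i)
  /-- MP4 for the steps below the counter (step `k` is added by R10d's three tests) -/
  done : ∀ k' : Nat, k' < k → Mapping.CouplingOK v.mem g.f (mapAt g v.mem i) k'

/-- **cut296 = loop37 (0x116351), the head of the coupling loop** with `k` steps finished. `AtR10h u₀ g i k v`: the exit assertion of
`start_decoder.R10a` (k = 0) and of `start_decoder.R10d` (k + 1), the entry assertion of `start_decoder.R10b`. -/
def AtR10h (u₀ : State) (g : Ghost) (i k : Nat) (v : State) : Prop :=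
  ∃ A7 A7c Ai A, InR10 u₀ g L.start_decoder.cut296 i k A7 A7c Ai A v

/-- **cut290 (0x116248), the return of the first `get_bits`** (magnitude; eax is stored as a byte, re-loaded and tested: no
constraint): the point of R10 and `k < coupling_steps` (from `jg` 0x116357). -/
structure BodyR10b (u₀ : State) (g : Ghost) (i k : Nat) (A7 A7c Ai : Arena) (A : Arena × List Obj) (v : State) : Prop where
  /-- the point at cut290 -/
  pt : InR10 u₀ g L.start_decoder.cut290 i k A7 A7c Ai A v
  /-- the loop test passed: step `k` exists (so `chan + 3·k + {0, 1}` lie in the `chan` block: `k < coupling_steps ≤ C`) -/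
  k_lt : k < Mapping.coupling_steps v.mem (mapAt g v.mem i)

/-- `AtR10b u₀ g i k v`: an exit assertion of `start_decoder.R10b`, the entry assertion of `start_decoder.R10c`. -/
def AtR10b (u₀ : State) (g : Ghost) (i k : Nat) (v : State) : Prop := ∃ A7 A7c Ai A, BodyR10b u₀ g i k A7 A7c Ai A v

/-- **cut292 (0x1162a1), the return of the second `get_bits`** (angle; eax is stored as a byte, re-loaded and tested: no
constraint): the point of R10, `k < coupling_steps`, `r12 = 3·k`, and the two spilled addresses that R10d passes to its check calls. -/
structure BodyR10c (u₀ : State) (g : Ghost) (i k : Nat) (A7 A7c Ai : Arena) (A : Arena × List Obj) (v : State) : Prop where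
  /-- the point at cut292 -/
  pt : InR10 u₀ g L.start_decoder.cut292 i k A7 A7c Ai A v
  /-- step `k` exists -/
  k_lt : k < Mapping.coupling_steps v.mem (mapAt g v.mem i)
  /-- r12 = 3·k (`movsxd r12, r13d ; imul r12, r12, 3` 0x11625d – 0x116260; read 0x1162af, 0x1162c8; callee-saved over ilog / get_bits) -/
  r12 : v.reg .r12 = addr (3 * k)
  /-- qword `[R + 30H]` = m + 8, the address of `m->chan` (stored 0x116250; read 0x1162a5 as the address of the checked load8) -/
  s30 : v.mem.u64 (g.R + 0x30) = mapAt g v.mem i + 8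
  /-- qword `[R + 38H]` = f + 4, the address of `f->channels` (stored 0x11627f; read 0x1162e4 as the address of the checked load4) -/
  s38 : v.mem.u64 (g.R + 0x38) = g.f + 4

/-- `AtR10c u₀ g i k v`: the exit assertion of `start_decoder.R10c`, the entry assertion of `start_decoder.R10d`. -/
def AtR10c (u₀ : State) (g : Ghost) (i k : Nat) (v : State) : Prop := ∃ A7 A7c Ai A, BodyR10c u₀ g i k A7 A7c Ai A v

/-- **The entry of one of the three error stubs of segment R10** (`mov esi, 20 ; mov rdi, rbp ; call error ; jmp 113b22`: lines
4113, 4114, 4115). -/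
def IsStubR10 (pc : Word) : Prop :=
  pc = L.start_decoder.at_1162f9 ∨ pc = L.start_decoder.at_116323 ∨ pc = L.start_decoder.at_11633b

/-- **A stub's entry**: the mapping loop's record at one of the three addresses — nothing about the record under construction is
needed (`MapLoop.toERR`: H2, H3 from `Mid g 7 8 8`, H5 from MAPS(i)). `AtR10s u₀ g v`: an exit assertion of
`start_decoder.R10d`, the entry assertion of `start_decoder.R10e`. -/
def AtR10s (u₀ : State) (g : Ghost) (v : State) : Prop :=
  ∃ pc i A7 A7c Ai A, IsStubR10 pc ∧ MapLoop u₀ g pc i A7 A7c Ai A v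

/-! ### The claims of the children -/

/-- **Segment `start_decoder.R10a`** (0x116380 – 0x116385): `r13d = dword [R + 24H] = 0`, `jmp` to the head of loop 4110 with `k = 0`. -/
def SegR10a (Lay : Layout) (μ : Microarch) (u₀ : State) : Prop :=
  ∀ (g : Ghost) (i : Nat) (v : State), AtR10 u₀ g i v → ReachVia Lay μ WayInv v (fun w => AtR10h u₀ g i 0 w)

/-- **Segment `start_decoder.R10b`** (0x116351 – 0x116357, 0x116233 – 0x116243): the loop test; `k ≥ coupling_steps`: R11 (MP4 is
complete); else `ilog(f->channels − 1)` and the first `get_bits`; exit at its return (cut290). -/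
def SegR10b (Lay : Layout) (μ : Microarch) (u₀ : State) : Prop :=
  ∀ (g : Ghost) (i k : Nat) (v : State), AtR10h u₀ g i k v →
    ReachVia Lay μ WayInv v (fun w => AtR11 u₀ g i w ∨ AtR10b u₀ g i k w)

/-- **Segment `start_decoder.R10c`** (0x116248 – 0x11629c): `chan[k].magnitude` (checked load8 of `m->chan`, checked store1), the two
spills, the checked load of `f->channels`, `ilog`, the second `get_bits`; exit at its return (cut292). -/
def SegR10c (Lay : Layout) (μ : Microarch) (u₀ : State) : Prop :=
  ∀ (g : Ghost) (i k : Nat) (v : State), AtR10b u₀ g i k v → ReachVia Lay μ WayInv v (fun w => AtR10c u₀ g i k w)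

/-- **Segment `start_decoder.R10d`** (0x1162a1 – 0x1162f7, 0x11630b – 0x116321, 0x116335 – 0x116339, 0x11634d): `chan[k].angle`
(checked store1), the three tests of lines 4113 – 4115 on the re-loaded bytes, `++k`; exit at the head with `k + 1` or at a stub. -/
def SegR10d (Lay : Layout) (μ : Microarch) (u₀ : State) : Prop :=
  ∀ (g : Ghost) (i k : Nat) (v : State), AtR10c u₀ g i k v →
    ReachVia Lay μ WayInv v (fun w => AtR10h u₀ g i (k + 1) w ∨ AtR10s u₀ g w)

/-- **Segment `start_decoder.R10e`, the three error stubs** (0x1162f9 – 0x116306, 0x116323 – 0x116330, 0x11633b – 0x116348):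
`error(f, VORBIS_invalid_setup)`, `jmp` to the epilogue (`AtERR`, eax = 0, `Failed`). -/
def SegR10e (Lay : Layout) (μ : Microarch) (u₀ : State) : Prop :=
  ∀ (g : Ghost) (v : State), AtR10s u₀ g v → ReachVia Lay μ WayInv v (fun w => AtERR u₀ g w)

/-! ### The hand-over lemmas of the cut assertions (pure logic; from the farm worker's Lemmas.lean) -/

namespace R10

/-- **The entry of the segment**: `BodyR10` with `r13 = 0` is the point of R10 with no coupling step finished (the worker's
`Pt.of_body`). -/
theorem of_body {u₀ : State} {g : Ghost} {i : Nat} {A7 A7c Ai : Arena} {A : Arena × List Obj} {v : State}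
    (h : BodyR10 u₀ g i A7 A7c Ai A v) (hr : v.reg .r13 = addr 0) : InR10 u₀ g pc_R10 i 0 A7 A7c Ai A v :=
  { loop := h.loop
    rbx := h.rbx
    cur := h.cur
    r13 := hr
    k_le := Nat.zero_le _
    done := fun k' hk' => absurd hk' (Nat.not_lt_zero k') }

/-- **The exit of the loop** (`k ≥ coupling_steps` at 0x11635d): MP4 holds for every step: `AtR11` (the worker's `Pt.toR11`). -/
theorem toR11 {u₀ : State} {g : Ghost} {i k : Nat} {A7 A7c Ai : Arena} {A : Arena × List Obj} {v : State}
    (h : InR10 u₀ g pc_R11 i k A7 A7c Ai A v) (hk : Mapping.coupling_steps v.mem (mapAt g v.mem i) ≤ k) : AtR11 u₀ g i v := by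
  refine ⟨A7, A7c, Ai, A, h.loop, h.rbx, ?_⟩
  have hc := h.cur
  exact
    { lt := hc.lt
      MP2 := hc.MP2
      MP3 := hc.MP3
      MP4_steps := hc.MP4_steps
      steps_pos := fun h10 => absurd h10 (by omega)
      MP4 := fun _ k' hk' => h.done k' (by omega)
      MP5 := fun h12 => absurd h12 (by omega) }

/-- **One more coupling step is finished** (the three tests of lines 4113 – 4115 passed; the worker's `Pt.succ`): from the point with
`k` and r13 = k + 1. -/
theorem succ {u₀ : State} {g : Ghost} {pc : Word} {i k : Nat} {A7 A7c Ai : Arena} {A : Arena × List Obj} {v : State}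
    (hl : MapLoop u₀ g pc i A7 A7c Ai A v) (hrbx : v.reg .rbx = addr (mapAt g v.mem i))
    (hcur : MapCur g (Since Ai A.1) v.mem i 10) (hr : v.reg .r13 = addr (k + 1))
    (hk : k < Mapping.coupling_steps v.mem (mapAt g v.mem i))
    (hdone : ∀ k' : Nat, k' < k → Mapping.CouplingOK v.mem g.f (mapAt g v.mem i) k')
    (hc : Mapping.CouplingOK v.mem g.f (mapAt g v.mem i) k) : InR10 u₀ g pc i (k + 1) A7 A7c Ai A v := by
  refine ⟨hl, hrbx, hcur, hr, hk, ?_⟩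
  intro k' hk'
  by_cases e : k' = k
  · rw [e]
    exact hc
  · exact hdone k' (by omega)

/-- **The counter is below 16 while a step is left**: `k < coupling_steps ≤ channels ≤ 16` (MP4's first half, HD1). -/
theorem k_lt16 {u₀ : State} {g : Ghost} {pc : Word} {i k : Nat} {A7 A7c Ai : Arena} {A : Arena × List Obj} {v : State}
    (h : InR10 u₀ g pc i k A7 A7c Ai A v) (hk : k < Mapping.coupling_steps v.mem (mapAt g v.mem i)) : k < 16 := by
  have h1 := h.cur.MP4_steps
  have h2 := h.loop.mid.header.HD1
  omega

end R10

/-! ### The composition -/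

/-- **THE COMPOSITION of the split of segment R10** (= the farm worker's `compose_r10`): a, then `ReachVia.loop` on the head with the
invariant `∃ k, AtR10h … k` and the measure `16 − r13`: one round = b → c → d; the measure decreases because `k < coupling_steps ≤ 16`
at cut290 and r13 goes from `k` to `k + 1`; e closes the stubs. Pure logic: no machine step. -/
theorem SegR10.of_parts {Lay : Layout} {μ : Microarch} {u₀ : State}
    (ha : SegR10a Lay μ u₀) (hb : SegR10b Lay μ u₀) (hc : SegR10c Lay μ u₀) (hd : SegR10d Lay μ u₀) (he : SegR10e Lay μ u₀) :
    SegR10 Lay μ u₀ := by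
  intro g i v hv
  refine (ha g i v hv).trans ?_
  intro w hw
  refine ReachVia.loop (Inv := fun x => ∃ k, AtR10h u₀ g i k x) (fun x => 16 - (x.reg .r13).toNat) ?_ w ⟨0, hw⟩
  intro x hx
  obtain ⟨k, hxk⟩ := hx
  have hrx : x.reg .r13 = addr k := by
    obtain ⟨_, _, _, _, hin⟩ := hxk
    exact hin.r13
  refine (hb g i k x hxk).trans ?_
  intro y hy
  rcases hy with h11 | hyb
  · exact ReachVia.done (Or.inl (Or.inl h11))
  · have hk16 : k < 16 := by
      obtain ⟨_, _, _, _, hbody⟩ := hyb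
      exact R10.k_lt16 hbody.pt hbody.k_lt
    refine (hc g i k y hyb).trans ?_
    intro z hz
    refine (hd g i k z hz).trans ?_
    intro t ht
    rcases ht with hnext | hstub
    · have hrt : t.reg .r13 = addr (k + 1) := by
        obtain ⟨_, _, _, _, hin⟩ := hnext
        exact hin.r13
      refine ReachVia.done (Or.inr ⟨⟨k + 1, hnext⟩, ?_⟩)
      show 16 - (t.reg .r13).toNat < 16 - (x.reg .r13).toNat
      rw [hrt, hrx, toNat_addr _ (by omega), toNat_addr _ (by omega)]
      omega
    · exact (he g t hstub).mono (fun _ herr => Or.inl (Or.inr herr))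

end Vorbis.Spec.StartDecoder
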